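-- pv_equiv track=rewrite | github.com/machops/ecosystem | backend/ai/engines/folding/vector_folding.py | _chunk_config
-- ===== SOURCE A (Python) =====
-- def _chunk_config(content: str) -> list[str]:
--     """Chunk config files by top-level sections."""
--     lines = content.split("\n")
--     chunks: list[str] = []
--     current: list[str] = []
--
--     for line in lines:
--         if line and not line[0].isspace() and line[0] not in ("#", "/", "-") and current:
--             chunk_text = "\n".join(current).strip()
--             if chunk_text:
--                 chunks.append(chunk_text)
--             current = [line]
--         else:
--             current.append(line)
--
--     if current:
--         chunk_text = "\n".join(current).strip()
--         if chunk_text: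
--             chunks.append(chunk_text)
--
--     return chunks if chunks else [content]
-- ===== SOURCE B (Python) =====
-- def _chunk_config(content: str) -> list[str]:
--     """Chunk config files by top-level sections (back-to-front grouping)."""
--     lines = content.split("\n")
--     groups: list[list[str]] = []
--     cur: list[str] = []
--     for line in reversed(lines):
--         cur = [line] + cur
--         if line and not line[0].isspace() and line[0] not in ("#", "/", "-"):
--             groups.append(cur)
--             cur = []
--     if cur:
--         groups.append(cur)
--     groups.reverse()
--     chunks = [t for t in ("\n".join(g).strip() for g in groups) if t]
--     return chunks if chunks else [content]
-- ===== Notes on version B (the rewrite author's own statement) =====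
-- stated objective: alternative
-- what changed: Replaces A's forward accumulate/flush state machine (which joins, strips and emits each chunk in-loop at every boundary) by a back-to-front grouping pass that closes a group at each top-level line, followed by a separate join/strip/filter pass over the groups.
import Mathlib
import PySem

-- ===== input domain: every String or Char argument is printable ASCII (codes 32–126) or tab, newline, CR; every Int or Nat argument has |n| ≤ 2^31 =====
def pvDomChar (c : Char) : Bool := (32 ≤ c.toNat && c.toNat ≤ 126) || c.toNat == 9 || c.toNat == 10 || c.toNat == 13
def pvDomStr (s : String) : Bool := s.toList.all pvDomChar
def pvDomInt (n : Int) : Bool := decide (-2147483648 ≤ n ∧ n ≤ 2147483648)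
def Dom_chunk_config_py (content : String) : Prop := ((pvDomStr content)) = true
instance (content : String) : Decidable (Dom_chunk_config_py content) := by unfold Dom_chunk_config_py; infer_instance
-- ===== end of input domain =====

-- B replaces A's accumulate/flush state machine by back-to-front grouping plus a separate
-- join/strip/filter pass (objective: alternative decomposition, same cost).

-- ===== PORT A =====
-- 'line and not line[0].isspace() and line[0] not in ("#", "/", "-")'
def pvTopA (line : String) : Bool :=
  match line.toList with
  | [] => false
  | c :: _ => !PySem.Chars.isspace c && !(c == '#') && !(c == '/') && !(c == '-')

-- the flush: join current, strip, append if non-empty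
def pvFlushA (chunks : List String) (cur : List String) : List String :=
  let t := PySem.Str.strip (PySem.Str.join "\n" cur)
  if t ≠ "" then chunks ++ [t] else chunks

def chunkAGo : List String → List String → List String → List String
  | [], chunks, cur => if cur ≠ [] then pvFlushA chunks cur else chunks
  | line :: rest, chunks, cur =>
      if pvTopA line && !(cur == []) then chunkAGo rest (pvFlushA chunks cur) [line]
      else chunkAGo rest chunks (cur ++ [line])

def chunk_config_py (content : String) : List String :=
  let lines := (PySem.Chars.splitOn content.toList ['\n']).map String.ofList
  let chunks := chunkAGo lines [] []
  if chunks ≠ [] then chunks else [content]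

-- ===== PORT B =====
def pvTopB (line : String) : Bool :=
  match line.toList with
  | [] => false
  | c :: _ => !PySem.Chars.isspace c && !(c == '#') && !(c == '/') && !(c == '-')

-- one step of B's loop over reversed(lines): prepend the line to cur, close a group at a boundary
def pvStepB (st : List (List String) × List String) (line : String) : List (List String) × List String :=
  let cur' := line :: st.2
  if pvTopB line then (st.1 ++ [cur'], []) else (st.1, cur')

def chunk_config_py_alt (content : String) : List String :=
  let lines := (PySem.Chars.splitOn content.toList ['\n']).map String.ofList
  let st := lines.reverse.foldl pvStepB ([], [])
  let groups := (if st.2 ≠ [] then st.1 ++ [st.2] else st.1).reverse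
  let chunks := (groups.map (fun g => PySem.Str.strip (PySem.Str.join "\n" g))).filter (fun t => !(t == ""))
  if chunks ≠ [] then chunks else [content]

-- ===== PRECONDITION & SPEC =====
def Spec_chunk_config_py (content : String) (out : List String) : Prop := out = chunk_config_py_alt content
instance (content : String) (out : List String) : Decidable (Spec_chunk_config_py content out) := by unfold Spec_chunk_config_py; infer_instance

-- ===== CLAIM (what is proved, stated in full; the proofs are below) =====
def Claim_equal_chunk_config_py : Prop := ∀ (content : String), Dom_chunk_config_py content → Spec_chunk_config_py content (chunk_config_py content)

-- ===== LEMMAS AND PROOFS =====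

-- forward grouping with a nonempty current group (the common characterisation)
def groupGo : List String → List String → List (List String)
  | [], cur => [cur]
  | l :: ls, cur => if pvTopA l then cur :: groupGo ls [l] else groupGo ls (cur ++ [l])

-- grouping of a suffix that starts at a boundary line
def bGroups : List String → List (List String)
  | [] => []
  | l :: ls => (l :: ls.takeWhile (fun x => !pvTopA x)) :: bGroups (ls.dropWhile (fun x => !pvTopA x))
termination_by l => l.length
decreasing_by
  simpa using Nat.lt_succ_of_le (List.length_dropWhile_le _ _)

lemma bGroups_nil : bGroups [] = [] := by
  rw [bGroups.eq_def]

lemma bGroups_cons (l : String) (ls : List String) :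
    bGroups (l :: ls) = (l :: ls.takeWhile (fun x => !pvTopA x)) :: bGroups (ls.dropWhile (fun x => !pvTopA x)) := by
  rw [bGroups.eq_def]

def pvMF (gs : List (List String)) : List String :=
  (gs.map (fun g => PySem.Str.strip (PySem.Str.join "\n" g))).filter (fun t => !(t == ""))

lemma pvTopB_eq (l : String) : pvTopB l = pvTopA l := rfl

lemma flush_eq (chunks cur : List String) :
    pvFlushA chunks cur = chunks ++ pvMF [cur] := by
  unfold pvFlushA pvMF
  by_cases h : PySem.Str.strip (PySem.Str.join "\n" cur) = "" <;>
    simp [List.filter, h]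

lemma chunkAGo_eq (ls : List String) : ∀ chunks cur, cur ≠ [] →
    chunkAGo ls chunks cur = chunks ++ pvMF (groupGo ls cur) := by
  induction ls with
  | nil =>
    intro chunks cur h
    simp [chunkAGo, h, groupGo, flush_eq]
  | cons l ls ih =>
    intro chunks cur h
    by_cases hp : pvTopA l = true
    · have : chunkAGo (l :: ls) chunks cur = chunkAGo ls (pvFlushA chunks cur) [l] := by
        simp [chunkAGo, hp, h]
      rw [this, ih _ _ (by simp)]
      rw [flush_eq]
      simp [groupGo, hp, pvMF, List.append_assoc, ← List.filter_append]
    · have : chunkAGo (l :: ls) chunks cur = chunkAGo ls chunks (cur ++ [l]) := by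
        simp [chunkAGo, hp]
      rw [this, ih _ _ (by simp)]
      simp [groupGo, hp]

lemma groupGo_eq (ls : List String) : ∀ cur,
    groupGo ls cur = (cur ++ ls.takeWhile (fun x => !pvTopA x)) :: bGroups (ls.dropWhile (fun x => !pvTopA x)) := by
  induction ls with
  | nil => intro cur; simp [groupGo, bGroups]
  | cons l ls ih =>
    intro cur
    by_cases hp : pvTopA l = true
    · rw [show groupGo (l :: ls) cur = cur :: groupGo ls [l] from by simp [groupGo, hp]]
      rw [ih]
      simp [hp, bGroups_cons]
    · rw [show groupGo (l :: ls) cur = groupGo ls (cur ++ [l]) from by simp [groupGo, hp]]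
      rw [ih]
      simp [hp]

-- B's reversed-foldl characterised by induction from the front (via foldr)
lemma foldrB_eq (ls : List String) :
    ls.foldr (fun x st => pvStepB st x) ([], []) =
      ((bGroups (ls.dropWhile (fun x => !pvTopA x))).reverse,
       ls.takeWhile (fun x => !pvTopA x)) := by
  induction ls with
  | nil => simp [bGroups_nil]
  | cons l ls ih =>
    simp only [List.foldr_cons, ih]
    by_cases hp : pvTopA l = true
    · simp [pvStepB, pvTopB_eq, hp, bGroups_cons]
    · simp [pvStepB, pvTopB_eq, hp]

lemma groups_eq (l : String) (rest : List String) :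
    (let st := ((l :: rest).reverse.foldl pvStepB ([], []));
     (if st.2 ≠ [] then st.1 ++ [st.2] else st.1).reverse) = groupGo rest [l] := by
  simp only [List.foldl_reverse, foldrB_eq]
  by_cases hp : pvTopA l = true
  · simp [hp, bGroups_cons, groupGo_eq]
  · simp [hp, groupGo_eq]

-- ===== VERDICT (by name: the statement is the Claim_ definition above) =====
theorem chunk_config_py_spec : Claim_equal_chunk_config_py := by
  intro content _
  unfold Spec_chunk_config_py chunk_config_py chunk_config_py_alt
  cases h : (PySem.Chars.splitOn content.toList ['\n']).map String.ofList with
  | nil => simp [chunkAGo]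
  | cons l rest =>
    have hb := groups_eq l rest
    simp only at hb
    show (if chunkAGo (l :: rest) [] [] ≠ [] then chunkAGo (l :: rest) [] [] else [content]) =
      (if List.filter (fun t => !t == "")
            (List.map (fun g => PySem.Str.strip (PySem.Str.join "\n" g))
              ((if (List.foldl pvStepB ([], []) (l :: rest).reverse).2 ≠ [] then
                  (List.foldl pvStepB ([], []) (l :: rest).reverse).1 ++
                    [(List.foldl pvStepB ([], []) (l :: rest).reverse).2]
                else (List.foldl pvStepB ([], []) (l :: rest).reverse).1).reverse)) ≠ [] then
        List.filter (fun t => !t == "")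
          (List.map (fun g => PySem.Str.strip (PySem.Str.join "\n" g))
            ((if (List.foldl pvStepB ([], []) (l :: rest).reverse).2 ≠ [] then
                (List.foldl pvStepB ([], []) (l :: rest).reverse).1 ++
                  [(List.foldl pvStepB ([], []) (l :: rest).reverse).2]
              else (List.foldl pvStepB ([], []) (l :: rest).reverse).1).reverse))
      else [content])
    rw [hb]
    rw [show chunkAGo (l :: rest) [] [] = chunkAGo rest [] [l] from by simp [chunkAGo]]
    rw [chunkAGo_eq rest [] [l] (by simp)]
    simp only [pvMF, List.nil_append]
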